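-- pv_equiv track=rewrite | github.com/JuanCS-Dev/daimon | scripts/generate_training_data.py | select_values_for_example
-- ===== SOURCE A (Python) =====
-- VALUES = ["verdade", "sabedoria", "justica", "florescimento", "alianca"]
--
-- def select_values_for_example(category: str, value_counts: dict[str, int]) -> list[str]:
--     """Select values to apply, prioritizing underrepresented ones."""
--
--     # Categories have natural affinities
--     category_affinities = {
--         "anti_sycophancy": ["verdade", "sabedoria"],
--         "ethical_dilemma": ["justica", "sabedoria", "verdade"],
--         "tribunal": ["verdade", "sabedoria", "justica"],
--         "counter_example": ["verdade", "sabedoria"],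
--         "logical_argument": ["verdade", "sabedoria"],
--         "value_application": VALUES,  # All values
--         "maieutica": ["sabedoria", "verdade"],
--         "hermetic_wisdom": ["sabedoria", "verdade", "florescimento"],
--         "jesus_philosophy": ["alianca", "florescimento", "justica"],
--         "modern_philosophy": ["sabedoria", "verdade"],
--         "presocratic_mathematics": ["verdade", "sabedoria"],
--         "scientific_method": ["verdade", "sabedoria"],
--     }
--
--     base_values = category_affinities.get(category, ["verdade", "sabedoria"])
--
--     # Add underrepresented values
--     sorted_values = sorted(VALUES, key=lambda v: value_counts.get(v, 0))
--
--     selected = list(base_values)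
--     for v in sorted_values:
--         if v not in selected and len(selected) < 3:
--             selected.append(v)
--
--     return selected[:3]
-- ===== SOURCE B (Python) =====
-- VALUES = ["verdade", "sabedoria", "justica", "florescimento", "alianca"]
--
-- def select_values_for_example(category: str, value_counts: dict[str, int]) -> list[str]:
--     """Select values to apply, prioritizing underrepresented ones."""
--     category_affinities = {
--         "anti_sycophancy": ["verdade", "sabedoria"],
--         "ethical_dilemma": ["justica", "sabedoria", "verdade"],
--         "tribunal": ["verdade", "sabedoria", "justica"],
--         "counter_example": ["verdade", "sabedoria"],
--         "logical_argument": ["verdade", "sabedoria"],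
--         "value_application": VALUES,
--         "maieutica": ["sabedoria", "verdade"],
--         "hermetic_wisdom": ["sabedoria", "verdade", "florescimento"],
--         "jesus_philosophy": ["alianca", "florescimento", "justica"],
--         "modern_philosophy": ["sabedoria", "verdade"],
--         "presocratic_mathematics": ["verdade", "sabedoria"],
--         "scientific_method": ["verdade", "sabedoria"],
--     }
--     # Keep the (truncated) affinity list, then fill the remaining slots by
--     # repeatedly extracting the least-represented value from the leftover pool
--     # (no sorting, no dedup scan: selection by repeated minimum).
--     selected = category_affinities.get(category, ["verdade", "sabedoria"])[:3]
--     pool = [v for v in VALUES if v not in selected]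
--     while len(selected) < 3 and pool:
--         best = min(pool, key=lambda v: value_counts.get(v, 0))
--         pool.remove(best)
--         selected.append(best)
--     return selected
-- ===== Notes on version B (the rewrite author's own statement) =====
-- stated objective: alternative
-- what changed: Replaces A's sort-then-dedup-scan (sort all VALUES by count, then a guarded loop appending unseen ones while len<3) by selection without sorting: keep the truncated affinity list and fill the remaining slots by repeatedly extracting the minimum-count value from the leftover pool.
import Mathlib
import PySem

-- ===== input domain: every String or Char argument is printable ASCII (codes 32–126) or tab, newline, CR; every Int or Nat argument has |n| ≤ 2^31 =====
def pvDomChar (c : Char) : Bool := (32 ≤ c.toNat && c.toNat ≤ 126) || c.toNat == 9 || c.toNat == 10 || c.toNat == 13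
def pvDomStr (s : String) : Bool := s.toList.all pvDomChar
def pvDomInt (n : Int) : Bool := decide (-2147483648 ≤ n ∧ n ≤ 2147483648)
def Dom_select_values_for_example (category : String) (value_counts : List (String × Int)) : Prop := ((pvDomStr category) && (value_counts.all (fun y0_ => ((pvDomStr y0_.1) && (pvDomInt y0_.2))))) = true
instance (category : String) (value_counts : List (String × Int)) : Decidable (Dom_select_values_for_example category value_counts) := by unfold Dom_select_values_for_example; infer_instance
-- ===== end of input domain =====

-- B replaces A's sort + dedup-scan by selection without sorting: keep the truncated affinity
-- list and fill the remaining slots by repeated minimum extraction from the leftover pool.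

-- shared module-level constant VALUES and the (identical) dict literal of both programs
def pvVALUES : List String := ["verdade", "sabedoria", "justica", "florescimento", "alianca"]

def pvAffinities : PySem.Dict String (List String) := PySem.Dict.ofList
  [ ("anti_sycophancy", ["verdade", "sabedoria"]),
    ("ethical_dilemma", ["justica", "sabedoria", "verdade"]),
    ("tribunal", ["verdade", "sabedoria", "justica"]),
    ("counter_example", ["verdade", "sabedoria"]),
    ("logical_argument", ["verdade", "sabedoria"]),
    ("value_application", pvVALUES),
    ("maieutica", ["sabedoria", "verdade"]),
    ("hermetic_wisdom", ["sabedoria", "verdade", "florescimento"]),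
    ("jesus_philosophy", ["alianca", "florescimento", "justica"]),
    ("modern_philosophy", ["sabedoria", "verdade"]),
    ("presocratic_mathematics", ["verdade", "sabedoria"]),
    ("scientific_method", ["verdade", "sabedoria"]) ]

-- ===== PORT A =====
def select_values_for_example (category : String) (value_counts : List (String × Int)) : List String :=
  let base_values := pvAffinities.getD category ["verdade", "sabedoria"]
  let sorted_values := PySem.List.sorted pvVALUES (fun v => (PySem.Dict.ofList value_counts).getD v 0)
  let selected := sorted_values.foldl
    (fun selected v => if v ∉ selected ∧ selected.length < 3 then selected ++ [v] else selected)
    base_values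
  PySem.List.slice selected none (some 3)

-- ===== PORT B =====
-- B's while loop: 'while len(selected) < 3 and pool: best = min(pool, key=…); pool.remove(best); selected.append(best)'
def pvPickLoop (counts : PySem.Dict String Int) (selected pool : List String) : List String :=
  if hloop : selected.length < 3 ∧ pool ≠ [] then
    match PySem.List.min? pool (fun v => counts.getD v 0) with
    | none => selected            -- unreachable: pool ≠ []
    | some best =>
      match PySem.List.remove? pool best with
      | none => selected          -- unreachable: best ∈ pool (Python's .remove would raise only then)
      | some pool' => pvPickLoop counts (selected ++ [best]) pool'
  else selected
termination_by 3 - selected.length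
decreasing_by simp [List.length_append]; omega

def select_values_for_example_alt (category : String) (value_counts : List (String × Int)) : List String :=
  let counts := PySem.Dict.ofList value_counts
  let selected := PySem.List.slice (pvAffinities.getD category ["verdade", "sabedoria"]) none (some 3)
  let pool := pvVALUES.filter (fun v => !selected.contains v)
  pvPickLoop counts selected pool

-- ===== PRECONDITION & SPEC =====
def Spec_select_values_for_example (category : String) (value_counts : List (String × Int)) (out : List String) : Prop := out = select_values_for_example_alt category value_counts
instance (category : String) (value_counts : List (String × Int)) (out : List String) : Decidable (Spec_select_values_for_example category value_counts out) := by unfold Spec_select_values_for_example; infer_instance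

-- ===== CLAIM (what is proved, stated in full; the proofs are below) =====
def Claim_equal_select_values_for_example : Prop := ∀ (category : String) (value_counts : List (String × Int)), Dom_select_values_for_example category value_counts → Spec_select_values_for_example category value_counts (select_values_for_example category value_counts)

-- ===== LEMMAS AND PROOFS =====

-- once the accumulator has length ≥ 3, A's loop never changes it
lemma foldA_fixed (s : List String) :
    ∀ (acc : List String), 3 ≤ acc.length →
      s.foldl (fun selected v => if v ∉ selected ∧ selected.length < 3 then selected ++ [v] else selected) acc = acc := by
  induction s with
  | nil => intro acc _; rfl
  | cons v s ih =>
      intro acc h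
      have : ¬ (v ∉ acc ∧ acc.length < 3) := by omega
      simp only [List.foldl_cons, if_neg this]
      exact ih acc h

-- Set.add only appends, so the start accumulator stays a prefix of the fold
lemma foldAdd_prefix (s : List String) :
    ∀ (acc : PySem.Set String), acc <+: s.foldl PySem.Set.add acc := by
  induction s with
  | nil => intro acc; exact List.prefix_refl acc
  | cons v s ih =>
      intro acc
      refine List.IsPrefix.trans ?_ (ih (PySem.Set.add acc v))
      unfold PySem.Set.add
      split
      · exact List.prefix_refl acc
      · exact ⟨[v], rfl⟩

lemma take_of_prefix {l₁ l₂ : List String} (h : l₁ <+: l₂) (hl : 3 ≤ l₁.length) :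
    l₂.take 3 = l₁.take 3 := by
  obtain ⟨t, rfl⟩ := h
  rw [List.take_append_of_le_length hl]

-- A's guarded loop and the unguarded dedup fold agree up to the first 3 elements
lemma fold_take_eq (s : List String) :
    ∀ (acc : List String),
      (s.foldl (fun selected v => if v ∉ selected ∧ selected.length < 3 then selected ++ [v] else selected) acc).take 3
        = (s.foldl PySem.Set.add acc).take 3 := by
  induction s with
  | nil => intro acc; rfl
  | cons v s ih =>
      intro acc
      simp only [List.foldl_cons]
      by_cases hm : v ∈ acc
      · have h1 : ¬ (v ∉ acc ∧ acc.length < 3) := by simp [hm]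
        have h2 : PySem.Set.add acc v = acc := by
          unfold PySem.Set.add; simp [hm]
        rw [if_neg h1, h2]; exact ih acc
      · by_cases hl : acc.length < 3
        · have h1 : (v ∉ acc ∧ acc.length < 3) := ⟨hm, hl⟩
          have h2 : PySem.Set.add acc v = acc ++ [v] := by
            unfold PySem.Set.add; simp [hm]
          rw [if_pos h1, h2]; exact ih (acc ++ [v])
        · have h1 : ¬ (v ∉ acc ∧ acc.length < 3) := by tauto
          have h2 : PySem.Set.add acc v = acc ++ [v] := by
            unfold PySem.Set.add; simp [hm]
          rw [if_neg h1, h2, foldA_fixed s acc (by omega)]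
          have hpre : acc ++ [v] <+: s.foldl PySem.Set.add (acc ++ [v]) :=
            foldAdd_prefix s (acc ++ [v])
          have := take_of_prefix (List.IsPrefix.trans ⟨[v], rfl⟩ hpre) (by omega)
          rw [this]

-- the dedup fold over a duplicate-free list is append-filter
lemma foldl_add_nodup (s : List String) :
    ∀ (acc : List String), s.Nodup →
      s.foldl PySem.Set.add acc = acc ++ s.filter (fun v => !acc.contains v) := by
  induction s with
  | nil => intro acc _; simp
  | cons v s ih =>
      intro acc hnd
      obtain ⟨hv, hnd'⟩ := List.nodup_cons.mp hnd
      simp only [List.foldl_cons]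
      by_cases hmem : v ∈ acc
      · have h2 : PySem.Set.add acc v = acc := by unfold PySem.Set.add; simp [hmem]
        rw [h2, ih acc hnd']
        simp [hmem]
      · have h2 : PySem.Set.add acc v = acc ++ [v] := by unfold PySem.Set.add; simp [hmem]
        rw [h2, ih _ hnd']
        have hfeq : s.filter (fun z => !(acc ++ [v]).contains z) = s.filter (fun z => !acc.contains z) := by
          apply List.filter_congr
          intro z hz
          have : z ≠ v := fun h => hv (h ▸ hz)
          simp [this]
        rw [hfeq]
        simp [hmem]

-- inserting an element smaller than everything in the list puts it in front
lemma insertBy_front (k : String → Int) (x : String) (zs : List String)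
    (h : ∀ z ∈ zs, k x < k z) :
    PySem.List.insertBy (fun a b => decide (k a < k b)) x zs = x :: zs := by
  cases zs with
  | nil => rfl
  | cons z zs =>
      have := h z (by simp)
      simp [PySem.List.insertBy, this]

-- filtering commutes with stable insertion into an already key-sorted list
lemma filter_insertBy (k : String → Int) (p : String → Bool) (x : String) :
    ∀ (ys : List String), ys.Pairwise (fun a b => k a ≤ k b) →
      (PySem.List.insertBy (fun a b => decide (k a < k b)) x ys).filter p =
        if p x then PySem.List.insertBy (fun a b => decide (k a < k b)) x (ys.filter p)
        else ys.filter p := by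
  intro ys
  induction ys with
  | nil =>
      intro _
      by_cases hpx : p x <;> simp [PySem.List.insertBy, hpx]
  | cons y ys ih =>
      intro hp
      obtain ⟨hy, hp'⟩ := List.pairwise_cons.mp hp
      by_cases hxy : k x < k y
      · by_cases hpy : p y
        · by_cases hpx : p x <;>
            simp [PySem.List.insertBy, hxy, hpy, hpx]
        · have hlt : ∀ z ∈ ys.filter p, k x < k z := by
            intro z hz
            exact lt_of_lt_of_le hxy (hy z (List.mem_of_mem_filter hz))
          by_cases hpx : p x <;>
            simp [PySem.List.insertBy, hxy, hpy, hpx, insertBy_front k x _ hlt]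
      · have hins : PySem.List.insertBy (fun a b => decide (k a < k b)) x (y :: ys)
            = y :: PySem.List.insertBy (fun a b => decide (k a < k b)) x ys := by
          simp [PySem.List.insertBy, hxy]
        rw [hins]
        by_cases hpy : p y <;> by_cases hpx : p x <;>
          simp [hpy, hpx, ih hp', PySem.List.insertBy, hxy]

-- filtering commutes with the stable sort
lemma filter_sorted (k : String → Int) (p : String → Bool) (l : List String) :
    (PySem.List.sorted l k false).filter p = PySem.List.sorted (l.filter p) k false := by
  induction l using List.reverseRecOn with
  | nil => rfl
  | append_singleton l x ih =>
      have hsnoc : ∀ (m : List String),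
          PySem.List.sorted (m ++ [x]) k false =
            PySem.List.insertBy (fun a b => decide (k a < k b)) x (PySem.List.sorted m k false) := by
        intro m
        rw [PySem.List.sorted_eq_foldl_insertBy, PySem.List.sorted_eq_foldl_insertBy, List.foldl_append]
        rfl
      rw [hsnoc l,
        filter_insertBy k p x _ (PySem.List.sorted_pairwise l k),
        ih, List.filter_append]
      by_cases hpx : p x
      · simp only [List.filter_cons, hpx, if_true, List.filter_nil]
        rw [hsnoc (l.filter p)]
      · simp [hpx]

-- unrolling B's loop: a full selection returns unchanged
lemma pickLoop_done (counts : PySem.Dict String Int) (sel pool : List String)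
    (h : sel.length = 3) : pvPickLoop counts sel pool = sel := by
  unfold pvPickLoop
  rw [dif_neg (by omega)]

-- unrolling B's loop: one slot left picks exactly the first minimum
lemma pickLoop_step (counts : PySem.Dict String Int) (sel pool : List String) (m : String)
    (h2 : sel.length = 2) (hm : PySem.List.min? pool (fun v => counts.getD v 0) = some m) :
    pvPickLoop counts sel pool = sel ++ [m] := by
  have hne : pool ≠ [] := by
    intro h; rw [h] at hm; simp [PySem.List.min?] at hm
  have hmem : m ∈ pool := PySem.List.min?_mem hm
  unfold pvPickLoop
  rw [dif_pos ⟨by omega, hne⟩]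
  obtain ⟨pool', hrem⟩ : ∃ pool', PySem.List.remove? pool m = some pool' := by
    cases h : PySem.List.remove? pool m with
    | none => exact absurd ((PySem.List.remove?_eq_none_iff pool m).mp h) (by simp [hmem])
    | some q => exact ⟨q, rfl⟩
  simp only [hm, hrem]
  refine pickLoop_done counts _ _ ?_
  simp [List.length_append, h2]

-- on a three-element list, the first element of the stable sort is the first minimum
lemma take1_sorted3 (k : String → Int) (a b c m : String)
    (hm : PySem.List.min? [a, b, c] k = some m) :
    (PySem.List.sorted [a, b, c] k false).take 1 = [m] := by
  simp only [PySem.List.min?, List.foldl_cons, List.foldl_nil] at hm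
  simp only [PySem.List.sorted, List.foldl_cons, List.foldl_nil, PySem.List.insertBy]
  split_ifs at hm ⊢ <;> simp_all [PySem.List.insertBy] <;> split_ifs at hm ⊢ <;> simp_all

-- on a three-element pool with one free slot, both sides pick the first minimum
lemma case_two (counts : PySem.Dict String Int) (b1 b2 p1 p2 p3 : String) :
    (([b1, b2] : List String) ++ PySem.List.sorted [p1, p2, p3] (fun v => counts.getD v 0) false).take 3
      = pvPickLoop counts [b1, b2] [p1, p2, p3] := by
  obtain ⟨m, hm⟩ : ∃ m, PySem.List.min? [p1, p2, p3] (fun v => counts.getD v 0) = some m := by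
    cases h : PySem.List.min? [p1, p2, p3] (fun v => counts.getD v 0) with
    | none => exact absurd ((PySem.List.min?_eq_none_iff _ _).mp h) (by simp)
    | some m => exact ⟨m, rfl⟩
  rw [pickLoop_step counts _ _ m rfl hm]
  simp only [List.cons_append, List.nil_append, List.take_succ_cons]
  rw [take1_sorted3 _ p1 p2 p3 m hm]

-- a two-element affinity list: the B-side slice and pool evaluate and case_two applies
lemma per_base2 (counts : PySem.Dict String Int) (b1 b2 p1 p2 p3 : String)
    (hpool : pvVALUES.filter (fun v => !([b1, b2] : List String).contains v) = [p1, p2, p3]) :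
    (([b1, b2] : List String) ++
        PySem.List.sorted (pvVALUES.filter (fun v => !([b1, b2] : List String).contains v))
          (fun v => counts.getD v 0) false).take 3
      = pvPickLoop counts (PySem.List.slice [b1, b2] none (some 3))
          (pvVALUES.filter (fun v => !(PySem.List.slice ([b1, b2] : List String) none (some 3)).contains v)) := by
  have hsl : PySem.List.slice ([b1, b2] : List String) none (some 3) = [b1, b2] := by
    rw [PySem.List.slice_to _ (by norm_num)]
    exact List.take_of_length_le (by simp)
  rw [hsl, hpool]
  exact case_two counts b1 b2 p1 p2 p3

-- an affinity list of length ≥ 3: both sides are its first three elements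
lemma per_base3 (counts : PySem.Dict String Int) (base : List String) (h3 : 3 ≤ base.length) :
    (base ++
        PySem.List.sorted (pvVALUES.filter (fun v => !base.contains v))
          (fun v => counts.getD v 0) false).take 3
      = pvPickLoop counts (PySem.List.slice base none (some 3))
          (pvVALUES.filter (fun v => !(PySem.List.slice base none (some 3)).contains v)) := by
  rw [List.take_append_of_le_length h3]
  have hsl : PySem.List.slice base none (some 3) = base.take 3 := by
    rw [PySem.List.slice_to _ (by norm_num)]
    exact rfl
  rw [hsl]
  exact (pickLoop_done counts _ _ (by simp; omega)).symm

-- ===== VERDICT (by name: the statement is the Claim_ definition above) =====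
theorem select_values_for_example_spec : Claim_equal_select_values_for_example := by
  intro category value_counts _
  unfold Spec_select_values_for_example select_values_for_example select_values_for_example_alt
  have hknd : (PySem.List.sorted pvVALUES (fun v => (PySem.Dict.ofList value_counts).getD v 0)).Nodup :=
    (PySem.List.sorted_perm pvVALUES _ _).symm.nodup (by decide)
  set counts := PySem.Dict.ofList value_counts with hc
  set base := pvAffinities.getD category ["verdade", "sabedoria"] with hbase
  rw [PySem.List.slice_to _ (by norm_num)]
  simp only [show Int.toNat 3 = 3 from rfl]
  rw [fold_take_eq, foldl_add_nodup _ _ hknd, filter_sorted]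
  cases h : pvAffinities.get? category with
  | none =>
      rw [PySem.Dict.getD_of_get?_eq_none _ _ h] at hbase
      rw [hbase]
      exact per_base2 counts "verdade" "sabedoria" "justica" "florescimento" "alianca" (by decide)
  | some v =>
      rw [PySem.Dict.getD_of_get?_eq_some _ _ h] at hbase
      have hm := PySem.Dict.mem_items_of_get?_eq_some _ h
      have hItems : pvAffinities.items =
        [ ("anti_sycophancy", ["verdade", "sabedoria"]),
          ("ethical_dilemma", ["justica", "sabedoria", "verdade"]),
          ("tribunal", ["verdade", "sabedoria", "justica"]),
          ("counter_example", ["verdade", "sabedoria"]),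
          ("logical_argument", ["verdade", "sabedoria"]),
          ("value_application", pvVALUES),
          ("maieutica", ["sabedoria", "verdade"]),
          ("hermetic_wisdom", ["sabedoria", "verdade", "florescimento"]),
          ("jesus_philosophy", ["alianca", "florescimento", "justica"]),
          ("modern_philosophy", ["sabedoria", "verdade"]),
          ("presocratic_mathematics", ["verdade", "sabedoria"]),
          ("scientific_method", ["verdade", "sabedoria"]) ] := by decide
      rw [hItems] at hm
      simp only [List.mem_cons, List.not_mem_nil, or_false, Prod.mk.injEq] at hm
      rcases hm with ⟨_,h2⟩|⟨_,h2⟩|⟨_,h2⟩|⟨_,h2⟩|⟨_,h2⟩|⟨_,h2⟩|⟨_,h2⟩|⟨_,h2⟩|⟨_,h2⟩|⟨_,h2⟩|⟨_,h2⟩|⟨_,h2⟩ <;>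
        rw [h2] at hbase <;> rw [hbase] <;>
        first
          | exact per_base3 counts _ (by decide)
          | exact per_base2 counts "verdade" "sabedoria" "justica" "florescimento" "alianca" (by decide)
          | exact per_base2 counts "sabedoria" "verdade" "justica" "florescimento" "alianca" (by decide)
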